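-- pv_equiv track=rewrite | github.com/jesmaelnezhad/pool-analysis | main.py | group_count_x_days
-- ===== SOURCE A (Python) =====
-- def group_count_x_days(resultsList, x):
--     results = []
--     group_start = None
--     group_days = set()
--     group_size = 0
--     for row in resultsList:
--         day_date = row[0]
--         count = row[1]
--         if group_start is None:
--             group_start = day_date
--         if (not day_date in group_days) and (len(group_days) == x):
--             results.append([group_start, str(group_size)])
--             group_start = day_date
--             group_size = count
--             group_days.clear()
--             group_days.add(day_date)
--         else:
--             group_days.add(day_date)
--             group_size += count
--     results.append([group_start, str(group_size)])
--     return results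
-- ===== SOURCE B (Python) =====
-- def group_count_x_days(resultsList, x):
--     # Pass 1: partition the rows into groups (start_day, rows) using the
--     # same cut rule as the spec: cut when the day is new and x distinct
--     # days are already in the current group.
--     start = resultsList[0][0]
--     rows = []
--     days = set()
--     groups = []
--     for row in resultsList:
--         if row[0] not in days and len(days) == x:
--             groups.append((start, rows))
--             start, rows, days = row[0], [row], {row[0]}
--         else:
--             rows.append(row)
--             days.add(row[0])
--     groups.append((start, rows))
--     # Pass 2: reduce each group to [start_day, str(total count)].
--     return [[s, str(sum(c for _, c in g))] for s, g in groups]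
-- ===== Notes on version B (the rewrite author's own statement) =====
-- stated objective: alternative
-- what changed: A streams a formatted running aggregate (start, running int size) and emits output rows inline; B first materialises the partition into explicit (start, rows) groups and then maps each group to [start, str(sum of counts)] in a second pass.
-- outside the precondition, e.g. on group_count_x_days([], 0): A returns [[None, '0']], B raises IndexError
import Mathlib
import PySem

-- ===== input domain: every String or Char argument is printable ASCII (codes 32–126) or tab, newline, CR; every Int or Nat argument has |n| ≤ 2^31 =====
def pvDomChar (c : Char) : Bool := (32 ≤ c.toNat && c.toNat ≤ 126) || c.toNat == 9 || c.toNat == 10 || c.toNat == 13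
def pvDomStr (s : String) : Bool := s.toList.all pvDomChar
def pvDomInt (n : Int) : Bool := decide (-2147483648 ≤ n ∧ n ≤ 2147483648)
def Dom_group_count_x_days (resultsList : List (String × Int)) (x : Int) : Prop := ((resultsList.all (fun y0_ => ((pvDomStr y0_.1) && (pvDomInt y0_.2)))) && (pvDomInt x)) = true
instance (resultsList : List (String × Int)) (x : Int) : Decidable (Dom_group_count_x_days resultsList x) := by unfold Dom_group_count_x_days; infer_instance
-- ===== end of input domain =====

-- B materialises the partition into explicit (start, rows) groups first and reduces
-- them in a second pass; same result as A's inline streaming aggregation (objective: alternative).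

-- ===== PORT A =====
-- A's loop state: (results, group_start, group_days, group_size)
def gcxdStepA (x : Int)
    (st : List (List String) × Option String × PySem.Set String × Int)
    (row : String × Int) :
    List (List String) × Option String × PySem.Set String × Int :=
  let results := st.1
  let group_start := st.2.1
  let group_days := st.2.2.1
  let group_size := st.2.2.2
  let day_date := row.1
  let count := row.2
  let group_start := match group_start with
    | none => some day_date
    | some s => some s
  if (!(PySem.Set.contains group_days day_date)) && ((PySem.Set.len group_days : Int) == x) then
    (results ++ [[group_start.getD "", PySem.Int.toStr group_size]],
      some day_date, PySem.Set.add PySem.Set.empty day_date, count)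
  else
    (results, group_start, PySem.Set.add group_days day_date, group_size + count)

def group_count_x_days (resultsList : List (String × Int)) (x : Int) : List (List String) :=
  let st := resultsList.foldl (gcxdStepA x) ([], none, PySem.Set.empty, 0)
  st.1 ++ [[st.2.1.getD "", PySem.Int.toStr st.2.2.2]]

-- ===== PORT B =====
-- B's pass-1 loop state: (groups, start, rows, days)
def gcxdStepB (x : Int)
    (st : List (String × List (String × Int)) × String × List (String × Int) × PySem.Set String)
    (row : String × Int) :
    List (String × List (String × Int)) × String × List (String × Int) × PySem.Set String :=
  let groups := st.1
  let start := st.2.1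
  let rows := st.2.2.1
  let days := st.2.2.2
  if (!(PySem.Set.contains days row.1)) && ((PySem.Set.len days : Int) == x) then
    (groups ++ [(start, rows)], row.1, [row], PySem.Set.add PySem.Set.empty row.1)
  else
    (groups, start, rows ++ [row], PySem.Set.add days row.1)

-- pass 2: reduce one group to [start, str(sum of counts)]
def gcxdRender (g : String × List (String × Int)) : List String :=
  [g.1, PySem.Int.toStr (g.2.foldl (fun a r => a + r.2) 0)]

def group_count_x_days_alt (resultsList : List (String × Int)) (x : Int) : List (List String) :=
  match resultsList with
  | [] => []      -- Source B raises IndexError here (resultsList[0]); excluded by Pre_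
  | r0 :: _ =>
    let st := resultsList.foldl (gcxdStepB x) ([], r0.1, [], PySem.Set.empty)
    (st.1 ++ [(st.2.1, st.2.2.1)]).map gcxdRender

-- ===== PRECONDITION & SPEC =====
-- Pre_ excludes only the empty list, where A returns [[None, '0']] — None is not a
-- value of the declared String type (and B raises IndexError there).
def Pre_group_count_x_days (resultsList : List (String × Int)) (x : Int) : Prop :=
  resultsList ≠ []
instance (resultsList : List (String × Int)) (x : Int) : Decidable (Pre_group_count_x_days resultsList x) := by unfold Pre_group_count_x_days; infer_instance

def pvWitness_group_count_x_days : (List (String × Int)) × Int := ([("a", 1), ("b", 2)], 1)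

def Spec_group_count_x_days (resultsList : List (String × Int)) (x : Int) (out : List (List String)) : Prop := out = group_count_x_days_alt resultsList x
instance (resultsList : List (String × Int)) (x : Int) (out : List (List String)) : Decidable (Spec_group_count_x_days resultsList x out) := by unfold Spec_group_count_x_days; infer_instance

-- ===== CLAIM (what is proved, stated in full; the proofs are below) =====
def Claim_equal_group_count_x_days : Prop := ∀ (resultsList : List (String × Int)) (x : Int), Dom_group_count_x_days resultsList x → Pre_group_count_x_days resultsList x → Spec_group_count_x_days resultsList x (group_count_x_days resultsList x)

-- ===== LEMMAS AND PROOFS =====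

-- The invariant tying A's state to B's state mid-fold.
def gcxdInv (a : List (List String) × Option String × PySem.Set String × Int)
    (b : List (String × List (String × Int)) × String × List (String × Int) × PySem.Set String) : Prop :=
  a.1 = b.1.map gcxdRender ∧
  a.2.1 = some b.2.1 ∧
  a.2.2.1 = b.2.2.2 ∧
  a.2.2.2 = b.2.2.1.foldl (fun a r => a + r.2) 0

theorem gcxdInv_step (x : Int) (row : String × Int)
    (a : List (List String) × Option String × PySem.Set String × Int)
    (b : List (String × List (String × Int)) × String × List (String × Int) × PySem.Set String)
    (h : gcxdInv a b) : gcxdInv (gcxdStepA x a row) (gcxdStepB x b row) := by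
  obtain ⟨a1, a2, a3, a4⟩ := a
  obtain ⟨b1, b2, b3, b4⟩ := b
  obtain ⟨h1, h2, h3, h4⟩ := h
  simp only [gcxdInv] at *
  subst h1 h3 h4
  simp only [gcxdStepA, gcxdStepB, h2]
  split <;>
    simp_all [gcxdRender]

theorem gcxdInv_foldl (x : Int) (l : List (String × Int))
    (a : List (List String) × Option String × PySem.Set String × Int)
    (b : List (String × List (String × Int)) × String × List (String × Int) × PySem.Set String)
    (h : gcxdInv a b) :
    gcxdInv (l.foldl (gcxdStepA x) a) (l.foldl (gcxdStepB x) b) := by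
  induction l generalizing a b with
  | nil => exact h
  | cons r t ih => exact ih _ _ (gcxdInv_step x r a b h)

-- First iteration: starting from the two initial states, the invariant holds after one step.
theorem gcxdInv_first (x : Int) (r0 : String × Int) :
    gcxdInv (gcxdStepA x ([], none, PySem.Set.empty, 0) r0)
            (gcxdStepB x ([], r0.1, [], PySem.Set.empty) r0) := by
  simp only [gcxdStepA, gcxdStepB, gcxdInv]
  split <;> simp [gcxdRender]

-- ===== VERDICT (by name: the statement is the Claim_ definition above) =====
theorem group_count_x_days_spec : Claim_equal_group_count_x_days := by
  intro rl x _ hpre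
  unfold Spec_group_count_x_days
  match rl with
  | [] => exact absurd rfl hpre
  | r0 :: t =>
    have h := gcxdInv_foldl x t _ _ (gcxdInv_first x r0)
    unfold group_count_x_days group_count_x_days_alt
    obtain ⟨h1, h2, h3, h4⟩ := h
    simp only [List.foldl_cons, List.map_append, List.map_cons, List.map_nil, gcxdRender]
    rw [h1, h2, h4]
    simp
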